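-- pv_equiv track=rewrite | github.com/njtwomey/har_datasets | src/utils.py | build_seq_list
-- ===== SOURCE A (Python) =====
-- def build_seq_list(subs, win_len):
--     seq = []
--     si = 0
--     last_sub = subs[0]
--     for prev_sub in subs:
--         if prev_sub != last_sub:
--             si += 1
--         seq.extend([si] * win_len)
--         last_sub = prev_sub
--     return seq
-- ===== SOURCE B (Python) =====
-- from itertools import groupby
--
-- def build_seq_list(subs, win_len):
--     seq = []
--     for g, (_, grp) in enumerate(groupby(subs)):
--         n = sum(1 for _ in grp)
--         seq.extend([g] * (win_len * n))
--     return seq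
-- ===== Notes on version B (the rewrite author's own statement) =====
-- stated objective: idiomatic
-- what changed: B iterates the consecutive-equal runs with itertools.groupby and emits each segment index as one block [g]*(win_len*n) per run, instead of scanning element-by-element while tracking last_sub and a mutable boundary counter.
import Mathlib
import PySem

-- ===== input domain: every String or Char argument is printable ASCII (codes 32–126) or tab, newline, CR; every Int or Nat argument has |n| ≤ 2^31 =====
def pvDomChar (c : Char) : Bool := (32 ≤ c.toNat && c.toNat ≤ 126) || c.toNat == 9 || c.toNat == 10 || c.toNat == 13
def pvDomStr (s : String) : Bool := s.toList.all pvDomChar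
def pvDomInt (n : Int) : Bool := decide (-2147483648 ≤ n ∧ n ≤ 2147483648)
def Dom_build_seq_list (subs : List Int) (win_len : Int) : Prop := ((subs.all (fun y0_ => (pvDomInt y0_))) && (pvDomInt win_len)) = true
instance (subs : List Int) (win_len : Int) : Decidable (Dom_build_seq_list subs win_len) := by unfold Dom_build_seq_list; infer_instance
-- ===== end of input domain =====

-- B replaces A's element-by-element boundary scan by a run-grouping (itertools.groupby) pass; objective: idiomatic.
-- On empty subs A raises IndexError (it reads subs[0]) so Pre_ excludes the empty list.

-- ===== PORT A =====
-- the for-loop of A: per element, bump si at a boundary, extend seq by [si]*win_len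
def bslA_loop (win_len : Int) : List Int → Int → Int → List Int
  | [], _, _ => []
  | p :: rest, last_sub, si =>
    let si' := if p ≠ last_sub then si + 1 else si
    List.replicate win_len.toNat si' ++ bslA_loop win_len rest p si'

def build_seq_list (subs : List Int) (win_len : Int) : List Int :=
  match subs with
  | [] => []              -- subs[0] raises IndexError in Python; excluded by Pre_
  | h :: _ => bslA_loop win_len subs h 0

-- ===== PORT B =====
-- groupby(subs): the consecutive-equal runs of subs as (value, length) pairs
def bslB_runs : List Int → List (Int × Nat)
  | [] => []
  | x :: xs =>
    match bslB_runs xs with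
    | [] => [(x, 1)]
    | (y, n) :: rs => if x = y then (y, n + 1) :: rs else (x, 1) :: (y, n) :: rs

-- 'for g, (_, grp) in enumerate(groupby(subs)): seq.extend([g]*(win_len*n))'
def bslB_emit (win_len : Int) : List (Int × Nat) → Int → List Int
  | [], _ => []
  | (_, n) :: rs, g => List.replicate (win_len * (n : Int)).toNat g ++ bslB_emit win_len rs (g + 1)

def build_seq_list_alt (subs : List Int) (win_len : Int) : List Int :=
  bslB_emit win_len (bslB_runs subs) 0

-- ===== PRECONDITION & SPEC =====
-- Pre_ excludes exactly the empty list, on which A raises IndexError.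
def Pre_build_seq_list (subs : List Int) (win_len : Int) : Prop := subs ≠ []
instance (subs : List Int) (win_len : Int) : Decidable (Pre_build_seq_list subs win_len) := by unfold Pre_build_seq_list; infer_instance
def pvWitness_build_seq_list : List Int × Int := ([1, 1, 2], 3)

def Spec_build_seq_list (subs : List Int) (win_len : Int) (out : List Int) : Prop := out = build_seq_list_alt subs win_len
instance (subs : List Int) (win_len : Int) (out : List Int) : Decidable (Spec_build_seq_list subs win_len out) := by unfold Spec_build_seq_list; infer_instance

-- ===== CLAIM (what is proved, stated in full; the proofs are below) =====
def Claim_equal_build_seq_list : Prop := ∀ (subs : List Int) (win_len : Int), Dom_build_seq_list subs win_len → Pre_build_seq_list subs win_len → Spec_build_seq_list subs win_len (build_seq_list subs win_len)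
-- ===== LEMMAS AND PROOFS =====

theorem bsl_toNat_mul (w : Int) (n : Nat) : (w * (n : Int)).toNat = w.toNat * n := by
  by_cases hw : 0 ≤ w
  · rcases Int.eq_ofNat_of_zero_le hw with ⟨m, rfl⟩
    rw [← Int.natCast_mul, Int.toNat_natCast, Int.toNat_natCast]
  · have h1 : w.toNat = 0 := Int.toNat_of_nonpos (by omega)
    rcases Nat.eq_zero_or_pos n with rfl | hn
    · simp [h1]
    · have hn' : (0 : Int) ≤ (n : Int) := by positivity
      have : w * (n : Int) ≤ 0 := mul_nonpos_of_nonpos_of_nonneg (by omega) hn'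
      simp [Int.toNat_of_nonpos this, h1]

-- the head value of bslB_runs (x :: xs) is x
theorem bslB_runs_head (x : Int) (xs : List Int) :
    ∃ n rs, bslB_runs (x :: xs) = (x, n) :: rs := by
  simp only [bslB_runs]
  rcases h : bslB_runs xs with _ | ⟨⟨y, n⟩, rs⟩
  · exact ⟨1, [], rfl⟩
  · by_cases hx : x = y
    · subst hx; exact ⟨n + 1, rs, by simp⟩
    · exact ⟨1, (y, n) :: rs, by simp [hx]⟩

-- the key invariant relating A's scan to B's run expansion
theorem bsl_loop_runs (w : Int) (xs : List Int) : ∀ (x si : Int),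
    bslA_loop w xs x si =
      match bslB_runs xs with
      | [] => []
      | (v, n) :: rs =>
        if v = x then List.replicate (w.toNat * n) si ++ bslB_emit w rs (si + 1)
        else List.replicate (w.toNat * n) (si + 1) ++ bslB_emit w rs (si + 2) := by
  induction xs with
  | nil => intro x si; simp [bslA_loop, bslB_runs]
  | cons p rest ih =>
    intro x si
    simp only [bslA_loop]
    rcases h : bslB_runs rest with _ | ⟨⟨y, n⟩, rs⟩
    · -- rest has no runs, i.e. rest = []
      have hrest : rest = [] := by
        cases rest with
        | nil => rfl
        | cons a as => obtain ⟨m, rs, hh⟩ := bslB_runs_head a as; rw [hh] at h; cases h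
      subst hrest
      by_cases hp : p = x <;>
        simp [bslA_loop, bslB_runs, bslB_emit, hp]
    · have e : w.toNat * (n + 1) = w.toNat + w.toNat * n := by ring
      rw [ih p (if p ≠ x then si + 1 else si), h]
      simp only [bslB_runs, h]
      by_cases hp : p = x <;> by_cases hy : p = y <;>
        simp_all [bslB_emit, bsl_toNat_mul, e, List.replicate_add, List.append_assoc,
          Ne.symm, -List.replicate_append_replicate] <;>
        ring_nf
-- ===== VERDICT (by name: the statement is the Claim_ definition above) =====
theorem build_seq_list_spec : Claim_equal_build_seq_list := by
  intro subs win_len _ hpre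
  unfold Spec_build_seq_list
  cases subs with
  | nil => exact absurd rfl hpre
  | cons h t =>
    show bslA_loop win_len (h :: t) h 0 = bslB_emit win_len (bslB_runs (h :: t)) 0
    rw [bsl_loop_runs]
    obtain ⟨n, rs, hr⟩ := bslB_runs_head h t
    rw [hr]
    simp [bslB_emit, bsl_toNat_mul]
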